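-- pv_equiv track=rewrite | github.com/MazenMDev/python-backend-engineering | week-1-fundamentals/Data Structures/List Exercises.py | alternate_merge
-- ===== SOURCE A (Python) =====
-- def alternate_merge(list1, list2):
--   result = []
--   for item1, item2 in zip(list1, list2):
--     result.append(item1)
--     result.append(item2)
--
--   longer_start = len(min([list1, list2], key=len))
--   result.extend(list1[longer_start:])
--   result.extend(list2[longer_start:])
--   return result
-- ===== SOURCE B (Python) =====
-- from itertools import zip_longest
--
-- def alternate_merge(list1, list2):
--   sentinel = object()
--   result = []
--   for a, b in zip_longest(list1, list2, fillvalue=sentinel):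
--     if a is not sentinel:
--       result.append(a)
--     if b is not sentinel:
--       result.append(b)
--   return result
-- ===== Notes on version B (the rewrite author's own statement) =====
-- stated objective: idiomatic
-- what changed: Replaces A's three phases (zip loop, min-length computation, two tail slice-extends) by a single zip_longest loop with a fresh sentinel, so leftovers are handled in the same uniform pass and no slicing occurs.
import Mathlib
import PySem

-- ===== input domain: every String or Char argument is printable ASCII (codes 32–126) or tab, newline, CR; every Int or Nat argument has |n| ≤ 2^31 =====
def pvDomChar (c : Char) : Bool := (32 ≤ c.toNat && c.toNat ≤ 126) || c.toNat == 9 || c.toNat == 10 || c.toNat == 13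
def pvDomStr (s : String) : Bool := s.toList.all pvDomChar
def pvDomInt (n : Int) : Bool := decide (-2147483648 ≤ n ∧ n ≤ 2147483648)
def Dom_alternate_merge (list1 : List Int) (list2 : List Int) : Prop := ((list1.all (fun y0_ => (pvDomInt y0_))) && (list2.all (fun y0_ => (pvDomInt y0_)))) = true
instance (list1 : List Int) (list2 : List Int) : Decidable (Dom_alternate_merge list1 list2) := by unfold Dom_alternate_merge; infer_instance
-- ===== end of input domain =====

-- B replaces A's zip loop + min-length + two tail slice-extends by one uniform zip_longest-style pass (idiomatic; same cost).
-- ===== PORT A =====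
def alternate_merge (list1 : List Int) (list2 : List Int) : List Int :=
  -- result = []; for item1, item2 in zip(list1, list2): append both
  let result : List Int := (list1.zip list2).foldl (fun r p => (r ++ [p.1]) ++ [p.2]) []
  -- longer_start = len(min([list1, list2], key=len))  (min returns the FIRST minimal: list1 on a tie)
  let shorter : List Int := if (list2.length : Int) < (list1.length : Int) then list2 else list1
  let longer_start : Int := (shorter.length : Int)
  -- result.extend(list1[longer_start:]); result.extend(list2[longer_start:])
  (result ++ PySem.List.slice list1 (some longer_start) none) ++ PySem.List.slice list2 (some longer_start) none

-- ===== PORT B =====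
-- zip_longest over both lists with a sentinel; append each present element (recursion on both lists).
def alternate_merge_alt (list1 : List Int) (list2 : List Int) : List Int :=
  match list1, list2 with
  | [], [] => []
  | [], y :: ys => y :: alternate_merge_alt [] ys
  | x :: xs, [] => x :: alternate_merge_alt xs []
  | x :: xs, y :: ys => x :: y :: alternate_merge_alt xs ys

-- ===== PRECONDITION & SPEC =====
def Spec_alternate_merge (list1 : List Int) (list2 : List Int) (out : List Int) : Prop := out = alternate_merge_alt list1 list2
instance (list1 : List Int) (list2 : List Int) (out : List Int) : Decidable (Spec_alternate_merge list1 list2 out) := by unfold Spec_alternate_merge; infer_instance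

-- ===== CLAIM (what is proved, stated in full; the proofs are below) =====
def Claim_equal_alternate_merge : Prop := ∀ (list1 : List Int) (list2 : List Int), Dom_alternate_merge list1 list2 → Spec_alternate_merge list1 list2 (alternate_merge list1 list2)

-- ===== LEMMAS AND PROOFS =====
theorem pv_foldl_acc (l : List (Int × Int)) (a : List Int) :
    l.foldl (fun r p => (r ++ [p.1]) ++ [p.2]) a = a ++ l.foldl (fun r p => (r ++ [p.1]) ++ [p.2]) [] := by
  induction l generalizing a with
  | nil => simp
  | cons h t ih => rw [List.foldl_cons, List.foldl_cons, ih ((a ++ [h.1]) ++ [h.2]), ih (([] ++ [h.1]) ++ [h.2])]; simp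

theorem pv_alt_nil_right (l : List Int) : alternate_merge_alt l [] = l := by
  induction l with
  | nil => simp [alternate_merge_alt]
  | cons x xs ih => simp [alternate_merge_alt, ih]

theorem pv_alt_nil_left (l : List Int) : alternate_merge_alt [] l = l := by
  induction l with
  | nil => simp [alternate_merge_alt]
  | cons y ys ih => simp [alternate_merge_alt, ih]

theorem pv_key (l1 l2 : List Int) : alternate_merge l1 l2 = alternate_merge_alt l1 l2 := by
  induction l1 generalizing l2 with
  | nil =>
    simp [alternate_merge, pv_alt_nil_left]
  | cons x xs ih =>
    cases l2 with
    | nil =>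
      simp [alternate_merge, pv_alt_nil_right]
    | cons y ys =>
      have h := ih ys
      simp only [alternate_merge, PySem.List.slice_from_natCast] at h ⊢
      simp only [List.zip_cons_cons, List.foldl, alternate_merge_alt]
      rw [pv_foldl_acc]
      by_cases hlt : (ys.length : Int) < (xs.length : Int)
      · have hlt' : ((y :: ys).length : Int) < ((x :: xs).length : Int) := by simp; omega
        simp only [if_pos hlt, if_pos hlt'] at h ⊢
        simp only [List.length_cons] at h ⊢
        simp only [List.drop_succ_cons, List.cons_append, List.nil_append, List.append_assoc] at h ⊢
        rw [h]
      · have hlt' : ¬ ((y :: ys).length : Int) < ((x :: xs).length : Int) := by simp; omega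
        simp only [if_neg hlt, if_neg hlt'] at h ⊢
        simp only [List.length_cons] at h ⊢
        simp only [List.drop_succ_cons, List.cons_append, List.nil_append, List.append_assoc] at h ⊢
        rw [h]

-- ===== VERDICT (by name: the statement is the Claim_ definition above) =====
theorem alternate_merge_spec : Claim_equal_alternate_merge := by
  intro l1 l2 _
  unfold Spec_alternate_merge
  exact pv_key l1 l2
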